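-- pv_equiv track=rewrite | github.com/guose1314/tcmautoresearch | src/research/evidence/text_segment_provenance.py | _line_spans
-- ===== SOURCE A (Python) =====
-- def _line_spans(text: str) -> list[tuple[int, int, int, str]]:
--     spans: list[tuple[int, int, int, str]] = []
--     offset = 0
--     for line_no, line in enumerate(text.splitlines(keepends=True), start=1):
--         start = offset
--         offset += len(line)
--         spans.append((line_no, start, offset, line))
--     if not spans and text:
--         spans.append((1, 0, len(text), text))
--     return spans
-- ===== SOURCE B (Python) =====
-- def _line_spans(text: str) -> list[tuple[int, int, int, str]]:
--     n = len(text)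
--     spans: list[tuple[int, int, int, str]] = []
--     pos = 0
--     line_no = 1
--     while pos < n:
--         i = pos
--         while i < n and text[i] != '\n' and text[i] != '\r':
--             i += 1
--         if i < n:
--             if text[i] == '\r' and i + 1 < n and text[i + 1] == '\n':
--                 i += 2
--             else:
--                 i += 1
--         spans.append((line_no, pos, i, text[pos:i]))
--         pos = i
--         line_no += 1
--     return spans
-- ===== Notes on version B (the rewrite author's own statement) =====
-- stated objective: alternative
-- what changed: B replaces splitlines(keepends=True) plus a running-offset loop with a single index-based scan that locates each line terminator directly and slices line, start and end out of the text, with no intermediate line list and no dead fallback branch.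
import Mathlib
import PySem

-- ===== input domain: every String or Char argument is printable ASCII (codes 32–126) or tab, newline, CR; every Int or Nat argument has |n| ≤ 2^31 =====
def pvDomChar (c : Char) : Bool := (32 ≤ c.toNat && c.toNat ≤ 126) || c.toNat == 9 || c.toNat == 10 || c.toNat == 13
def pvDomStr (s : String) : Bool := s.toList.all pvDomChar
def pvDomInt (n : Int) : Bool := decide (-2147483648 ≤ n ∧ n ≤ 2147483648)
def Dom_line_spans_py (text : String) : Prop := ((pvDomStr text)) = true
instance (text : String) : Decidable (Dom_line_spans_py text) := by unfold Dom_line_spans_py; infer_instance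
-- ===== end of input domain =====

-- B is an alternative single-scan implementation: it finds each line terminator by index
-- and slices line/start/end out of the text, instead of splitlines(keepends=True) plus a
-- running-offset loop; A's dead fallback branch is omitted (it never fires).

-- ===== PORT A =====
-- Hand port of str.splitlines(keepends=True): exact on the Dom alphabet, whose only line
-- breaks are '\n', '\r' and "\r\n" (other Unicode break characters lie outside Dom).
def slkGo : List Char → List Char → List (List Char)
  | [], acc => if acc.isEmpty then [] else [acc.reverse]
  | '\r' :: '\n' :: rest, acc => (acc.reverse ++ ['\r', '\n']) :: slkGo rest []
  | '\r' :: rest, acc => (acc.reverse ++ ['\r']) :: slkGo rest []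
  | '\n' :: rest, acc => (acc.reverse ++ ['\n']) :: slkGo rest []
  | c :: rest, acc => slkGo rest (c :: acc)

def line_spans_py (text : String) : List (Int × Int × Int × String) :=
  let spans :=
    ((slkGo text.toList []).foldl
      (fun (st : List (Int × Int × Int × String) × Int × Int) (line : List Char) =>
        let start := st.2.1
        let offset := st.2.1 + (line.length : Int)
        (st.1 ++ [(st.2.2, start, offset, String.ofList line)], offset, st.2.2 + 1))
      ([], 0, 1)).1
  if spans.isEmpty && !text.toList.isEmpty then
    [((1 : Int), (0 : Int), (text.toList.length : Int), text)]
  else spans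

-- ===== PORT B =====
-- Inner while loop of B: number of leading characters that are not '\n' or '\r'.
def bScan : List Char → Nat
  | [] => 0
  | c :: rest => if c = '\n' ∨ c = '\r' then 0 else bScan rest + 1

-- B's terminator adjustment of index i (the two nested ifs after the inner while).
def bLineEnd (s : List Char) : Nat :=
  if bScan s < s.length then
    if s[bScan s]? = some '\r' ∧ s[bScan s + 1]? = some '\n' then bScan s + 2 else bScan s + 1
  else bScan s

-- Outer while loop of B (fuel = remaining text length bounds the iterations).
def bGo : Nat → List Char → Nat → Int → List (Int × Int × Int × String)
  | 0, _, _, _ => []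
  | _ + 1, [], _, _ => []
  | fuel + 1, c :: rest, pos, lineNo =>
    let s := c :: rest
    let i := bLineEnd s
    (lineNo, (pos : Int), ((pos + i : Nat) : Int), String.ofList (s.take i)) ::
      bGo fuel (s.drop i) (pos + i) (lineNo + 1)

def line_spans_py_alt (text : String) : List (Int × Int × Int × String) :=
  bGo text.toList.length text.toList 0 1

-- ===== PRECONDITION & SPEC =====
def Spec_line_spans_py (text : String) (out : List (Int × Int × Int × String)) : Prop := out = line_spans_py_alt text
instance (text : String) (out : List (Int × Int × Int × String)) : Decidable (Spec_line_spans_py text out) := by unfold Spec_line_spans_py; infer_instance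

-- ===== CLAIM (what is proved, stated in full; the proofs are below) =====
def Claim_equal_line_spans_py : Prop := ∀ (text : String), Dom_line_spans_py text → Spec_line_spans_py text (line_spans_py text)

-- ===== LEMMAS AND PROOFS =====

theorem bScan_le_length (s : List Char) : bScan s ≤ s.length := by
  induction s with
  | nil => simp [bScan]
  | cons c rest ih => simp only [bScan, List.length_cons]; split <;> omega

theorem bLineEnd_pos (s : List Char) (h : s ≠ []) : 1 ≤ bLineEnd s := by
  have hlen : 0 < s.length := List.length_pos_iff.mpr h
  have hk := bScan_le_length s
  unfold bLineEnd
  split_ifs <;> omega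

theorem bLineEnd_le_length (s : List Char) : bLineEnd s ≤ s.length := by
  have hk := bScan_le_length s
  unfold bLineEnd
  split_ifs with h1 h2
  · have : bScan s + 1 + 1 ≤ s.length := by
      have hlt : bScan s + 1 < s.length := by
        by_contra hge
        have : s[bScan s + 1]? = none := by
          rw [List.getElem?_eq_none_iff]; omega
        rw [this] at h2
        exact absurd h2.2 (by simp)
      omega
    omega
  · omega
  · omega

theorem bLineEnd_cons (c : Char) (rest : List Char) (hc : ¬ (c = '\n' ∨ c = '\r')) :
    bLineEnd (c :: rest) = bLineEnd rest + 1 := by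
  have hscan : bScan (c :: rest) = bScan rest + 1 := by simp [bScan, hc]
  unfold bLineEnd
  simp only [hscan, List.length_cons, Nat.add_lt_add_iff_right, List.getElem?_cons_succ]
  split_ifs <;> omega

-- Characterization of slkGo: peel off the first line of s.
theorem slk_eq (s acc : List Char) :
    slkGo s acc =
      if s = [] then (if acc.isEmpty then [] else [acc.reverse])
      else (acc.reverse ++ s.take (bLineEnd s)) :: slkGo (s.drop (bLineEnd s)) [] := by
  induction s, acc using slkGo.induct with
  | case1 acc h => simp [slkGo.eq_1, h]
  | case2 acc h => simp [slkGo.eq_1, h]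
  | case3 rest acc ih =>
    have hle : bLineEnd ('\r' :: '\n' :: rest) = 2 := by simp [bLineEnd, bScan]
    rw [slkGo.eq_2, if_neg (by simp : ¬('\r' :: '\n' :: rest : List Char) = []), hle]
    simp
  | case4 rest acc hres ih =>
    have hr0 : ('\r' :: rest)[1]? ≠ some '\n' := by
      cases rest with
      | nil => simp
      | cons d tail =>
        simp only [List.getElem?_cons_succ, List.getElem?_cons_zero]
        intro hd
        injection hd with h
        exact hres tail (by rw [h])
    have hle : bLineEnd ('\r' :: rest) = 1 := by
      simp only [List.getElem?_cons_succ] at hr0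
      simp [bLineEnd, bScan, hr0]
    rw [slkGo.eq_3 _ _ hres, if_neg (by simp : ¬('\r' :: rest : List Char) = []), hle]
    simp
  | case5 rest acc ih =>
    have hle : bLineEnd ('\n' :: rest) = 1 := by simp [bLineEnd, bScan]
    rw [slkGo.eq_4, if_neg (by simp : ¬('\n' :: rest : List Char) = []), hle]
    simp
  | case6 c rest acc h1 h2 h3 ih =>
    have hc : ¬ (c = '\n' ∨ c = '\r') := by rintro (h | h); exacts [h3 h, h2 h]
    rw [slkGo.eq_5 _ _ _ h1 h2 h3, ih]
    by_cases hrest : rest = []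
    · subst hrest
      have hle : bLineEnd [c] = 1 := by simp [bLineEnd, bScan, hc]
      simp [slkGo.eq_1, hle]
    · rw [if_neg hrest, if_neg (by simp : ¬(c :: rest : List Char) = []), bLineEnd_cons c rest hc]
      simp [List.take_succ_cons, List.drop_succ_cons]

-- Fold characterization of A's loop.
def gList : List (List Char) → Int → Int → List (Int × Int × Int × String)
  | [], _, _ => []
  | l :: ls, off, ln => (ln, off, off + (l.length : Int), String.ofList l) :: gList ls (off + (l.length : Int)) (ln + 1)

theorem foldA (lines : List (List Char)) (spans : List (Int × Int × Int × String)) (off ln : Int) :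
    (lines.foldl
      (fun (st : List (Int × Int × Int × String) × Int × Int) (line : List Char) =>
        let start := st.2.1
        let offset := st.2.1 + (line.length : Int)
        (st.1 ++ [(st.2.2, start, offset, String.ofList line)], offset, st.2.2 + 1))
      (spans, off, ln)).1 = spans ++ gList lines off ln := by
  induction lines generalizing spans off ln with
  | nil => simp [gList]
  | cons l ls ih =>
    simp only [List.foldl_cons, gList]
    rw [ih]
    simp

theorem g_bGo (fuel : Nat) (s : List Char) (pos : Nat) (ln : Int) (hfuel : s.length ≤ fuel) :
    gList (slkGo s []) (pos : Int) ln = bGo fuel s pos ln := by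
  induction fuel generalizing s pos ln with
  | zero =>
    have : s = [] := by cases s <;> simp_all
    subst this
    simp [slkGo, gList, bGo]
  | succ fuel ih =>
    cases s with
    | nil => simp [slkGo, gList, bGo]
    | cons c rest =>
      rw [slk_eq]
      simp only [reduceCtorEq, if_false, List.reverse_nil, List.nil_append]
      have hle := bLineEnd_le_length (c :: rest)
      have hpos := bLineEnd_pos (c :: rest) (by simp)
      rw [gList, bGo]
      have hlen : ((c :: rest).take (bLineEnd (c :: rest))).length = bLineEnd (c :: rest) := by
        simp only [List.length_take]; omega
      rw [hlen]
      have hdroplen : ((c :: rest).drop (bLineEnd (c :: rest))).length ≤ fuel := by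
        simp only [List.length_drop, List.length_cons] at *
        omega
      have h := ih _ (pos + bLineEnd (c :: rest)) (ln + 1) hdroplen
      rw [Nat.cast_add] at h
      rw [h, Nat.cast_add]

theorem slk_ne_nil (s : List Char) (h : s ≠ []) : slkGo s [] ≠ [] := by
  rw [slk_eq]; simp [h]

-- ===== VERDICT (by name: the statement is the Claim_ definition above) =====
theorem line_spans_py_spec : Claim_equal_line_spans_py := by
  intro text _
  unfold Spec_line_spans_py line_spans_py line_spans_py_alt
  rw [foldA]
  simp only [List.nil_append]
  by_cases h : text.toList = []
  · rw [h]
    simp [slkGo, gList, bGo]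
  · have hne := slk_ne_nil text.toList h
    have hg : gList (slkGo text.toList []) 0 1 ≠ [] := by
      rcases hl : slkGo text.toList [] with _ | ⟨l, ls⟩
      · exact absurd hl hne
      · simp [gList]
    rw [if_neg (by simp [hg, h])]
    exact g_bGo text.toList.length text.toList 0 1 le_rfl
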